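-- pv_equiv track=rewrite | github.com/Joost987/AdventOfCode23 | Day14CodePart1.py | SlideRocksNColumn
-- ===== SOURCE A (Python) =====
-- def SlideRocksNColumn(column):
--     rockslst=[[]]
--     cubelst=[-1]
--     for i in range(len(column)):
--         if column[i]=="#":
--             cubelst.append(i)
--             rockslst.append([])
--         elif column[i]=="O":
--             if rockslst[-1]!=[]:
--                 rockslst[-1].append(rockslst[-1][-1]+1)
--             else:
--                 rockslst[-1].append(cubelst[-1]+1)
--     rockslst=[rock for rocks in rockslst for rock in rocks]
--     return rockslst
-- ===== SOURCE B (Python) =====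
-- def SlideRocksNColumn(column):
--     # Segment-based: split the column at each cube '#'; in a segment starting at s
--     # with k rolling rocks, the rocks rest at s, s+1, ..., s+k-1.
--     res = []
--     start = 0
--     for end, c in enumerate(column + ["#"]):
--         if c == "#":
--             cnt = column[start:end].count("O")
--             res.extend(range(start, start + cnt))
--             start = end + 1
--     return res
-- ===== Notes on version B (the rewrite author's own statement) =====
-- stated objective: alternative
-- what changed: Replaces A's per-rock placement with a segment-based scheme: the column is cut at each cube '#', the rolling rocks in a segment are counted with a slice .count, and the resting positions are emitted as one contiguous range(start, start+count) per segment.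
import Mathlib
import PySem

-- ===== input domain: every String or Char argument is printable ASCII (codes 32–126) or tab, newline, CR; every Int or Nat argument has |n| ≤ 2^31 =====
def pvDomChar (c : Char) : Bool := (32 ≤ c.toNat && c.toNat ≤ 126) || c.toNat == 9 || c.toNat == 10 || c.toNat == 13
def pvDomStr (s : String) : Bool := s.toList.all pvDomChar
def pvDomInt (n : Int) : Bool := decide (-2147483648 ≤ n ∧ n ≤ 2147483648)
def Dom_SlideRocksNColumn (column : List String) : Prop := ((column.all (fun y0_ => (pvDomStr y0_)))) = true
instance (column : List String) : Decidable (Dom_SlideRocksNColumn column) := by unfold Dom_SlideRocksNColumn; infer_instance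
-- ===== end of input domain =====

-- B is segment-based: it cuts the column at each cube '#', counts the 'O's of a segment
-- with a slice count and emits one contiguous range per segment (alternative decomposition).


-- ===== PORT A =====
-- A's loop: for each index i, on "#" append i to cubelst and a fresh bucket to rockslst;
-- on "O" append (last of last bucket)+1, or (last cube)+1 if the bucket is empty, to the last bucket.
def SlideRocksNColumnLoopA : List String → Int → List (List Int) → List Int → List (List Int) × List Int
  | [], _, rockslst, cubelst => (rockslst, cubelst)
  | c :: rest, i, rockslst, cubelst =>
    if c = "#" then
      SlideRocksNColumnLoopA rest (i + 1) (rockslst ++ [[]]) (cubelst ++ [i])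
    else if c = "O" then
      let last := rockslst.getLastD []
      let newlast :=
        match last.getLast? with
        | some x => last ++ [x + 1]          -- rockslst[-1] != []
        | none => last ++ [cubelst.getLastD 0 + 1]
      SlideRocksNColumnLoopA rest (i + 1) (rockslst.dropLast ++ [newlast]) cubelst
    else
      SlideRocksNColumnLoopA rest (i + 1) rockslst cubelst

def SlideRocksNColumn (column : List String) : List Int :=
  ((SlideRocksNColumnLoopA column 0 [[]] [-1]).1).flatten

-- ===== PORT B =====
-- B's loop over column + ["#"]: on "#" at index `end`, count the "O"s of the slice
-- column[start:end] and extend the result by range(start, start+cnt); then start := end+1.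
def SlideRocksNColumnLoopB (column : List String) : List String → Int → Int → List Int → List Int
  | [], _, _, res => res
  | c :: rest, i, start, res =>
    if c = "#" then
      SlideRocksNColumnLoopB column rest (i + 1) (i + 1)
        (res ++ PySem.List.pyRange start
            (start + (PySem.List.count (PySem.List.slice column (some start) (some i)) "O" : Int)) 1)
    else
      SlideRocksNColumnLoopB column rest (i + 1) start res

def SlideRocksNColumn_alt (column : List String) : List Int :=
  SlideRocksNColumnLoopB column (column ++ ["#"]) 0 0 []

-- ===== PRECONDITION & SPEC =====
def Spec_SlideRocksNColumn (column : List String) (out : List Int) : Prop := out = SlideRocksNColumn_alt column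
instance (column : List String) (out : List Int) : Decidable (Spec_SlideRocksNColumn column out) := by unfold Spec_SlideRocksNColumn; infer_instance

-- ===== CLAIM =====
def Claim_equal_SlideRocksNColumn : Prop := ∀ (column : List String), Dom_SlideRocksNColumn column → Spec_SlideRocksNColumn column (SlideRocksNColumn column)

-- ===== LEMMAS AND PROOFS =====

-- Ghost reference function: per-rock placement with a single next-free counter.
def gRocks : List String → Int → Int → List Int
  | [], _, _ => []
  | c :: rest, i, nf =>
    if c = "#" then gRocks rest (i + 1) (i + 1)
    else if c = "O" then nf :: gRocks rest (i + 1) (nf + 1)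
    else gRocks rest (i + 1) nf

-- A's loop flattens to the reference function.
theorem loopA_eq_gRocks (rest : List String) :
    ∀ (i : Int) (rs : List (List Int)) (lastRock : List Int) (cs : List Int) (clast : Int),
      ((SlideRocksNColumnLoopA rest i (rs ++ [lastRock]) (cs ++ [clast])).1).flatten =
        (rs ++ [lastRock]).flatten ++
          gRocks rest i (match lastRock.getLast? with | some x => x + 1 | none => clast + 1) := by
  induction rest with
  | nil => intro i rs lastRock cs clast; simp [SlideRocksNColumnLoopA, gRocks]
  | cons c rest ih =>
    intro i rs lastRock cs clast
    by_cases h1 : c = "#"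
    · simp only [SlideRocksNColumnLoopA, gRocks, h1]
      have := ih (i + 1) (rs ++ [lastRock]) [] (cs ++ [clast]) i
      simpa using this
    · by_cases h2 : c = "O"
      · simp only [SlideRocksNColumnLoopA, gRocks, h2]
        cases hL : lastRock.getLast? with
        | some x =>
          have := ih (i + 1) rs (lastRock ++ [x + 1]) cs clast
          simpa [List.getLastD_concat, List.dropLast_concat, hL] using this
        | none =>
          have hnil : lastRock = [] := List.getLast?_eq_none_iff.mp hL
          have := ih (i + 1) rs (lastRock ++ [clast + 1]) cs clast
          simpa [List.getLastD_concat, List.dropLast_concat, hL, hnil] using this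
      · simp only [SlideRocksNColumnLoopA, gRocks, if_neg h1, if_neg h2]
        rw [ih (i + 1) rs lastRock cs clast]

-- B's loop equals the reference function, via the running segment count.
theorem loopB_eq_gRocks (column : List String) :
    ∀ (rest : List String) (i start : Nat) (res : List Int),
      rest = column.drop i → start ≤ i →
      SlideRocksNColumnLoopB column (rest ++ ["#"]) (i : Int) (start : Int) res =
        res ++
          PySem.List.pyRange (start : Int)
            ((start : Int) + (((column.drop start).take (i - start)).count "O" : Int)) 1 ++
          gRocks rest (i : Int) ((start : Int) + (((column.drop start).take (i - start)).count "O" : Int)) := by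
  intro rest
  induction rest with
  | nil =>
    intro i start res hdrop hle
    simp [SlideRocksNColumnLoopB, gRocks, PySem.List.count_eq, PySem.List.slice_natCast]
  | cons c rest ih =>
    intro i start res hdrop hle
    have hget : column[i]? = some c := by
      have := congrArg List.head? hdrop
      simpa [List.head?_drop] using this.symm
    have hrest : rest = column.drop (i + 1) := by
      have := congrArg List.tail hdrop
      simpa [List.tail_drop] using this
    have htake : (column.drop start).take (i + 1 - start) =
        (column.drop start).take (i - start) ++ [c] := by
      have h1 : i + 1 - start = (i - start) + 1 := by omega
      have h2 : (column.drop start)[i - start]? = some c := by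
        rw [List.getElem?_drop]
        have : start + (i - start) = i := by omega
        rw [this]; exact hget
      rw [h1, List.take_add_one, h2]; rfl
    by_cases h1 : c = "#"
    · simp only [List.cons_append, SlideRocksNColumnLoopB, gRocks, h1]
      have hcast : ((i : Int) + 1) = ((i + 1 : Nat) : Int) := by push_cast; ring
      rw [hcast, ih (i + 1) (i + 1) _ hrest (le_refl _)]
      simp [PySem.List.count_eq, PySem.List.slice_natCast, PySem.List.pyRange_one_eq_nil]
    · by_cases h2 : c = "O"
      · simp only [List.cons_append, SlideRocksNColumnLoopB, gRocks, h2]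
        have hcast : ((i : Int) + 1) = ((i + 1 : Nat) : Int) := by push_cast; ring
        rw [hcast, ih (i + 1) start res hrest (by omega)]
        rw [htake]
        have hcnt : (((column.drop start).take (i - start) ++ [c]).count "O" : Int) =
            (((column.drop start).take (i - start)).count "O" : Int) + 1 := by
          rw [h2]; simp [List.count_append]
        rw [hcnt]
        have hsplit : PySem.List.pyRange (start : Int)
            ((start : Int) + ((((column.drop start).take (i - start)).count "O" : Int) + 1)) 1 =
            PySem.List.pyRange (start : Int)
              ((start : Int) + (((column.drop start).take (i - start)).count "O" : Int)) 1 ++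
            [(start : Int) + (((column.drop start).take (i - start)).count "O" : Int)] := by
          rw [← add_assoc]
          exact PySem.List.pyRange_one_succ_right (by omega)
        rw [hsplit]
        simp [add_assoc]
      · simp only [List.cons_append, SlideRocksNColumnLoopB, gRocks, if_neg h1, if_neg h2]
        have hcast : ((i : Int) + 1) = ((i + 1 : Nat) : Int) := by push_cast; ring
        rw [hcast, ih (i + 1) start res hrest (by omega)]
        rw [htake]
        have hcnt : ((column.drop start).take (i - start) ++ [c]).count "O" =
            ((column.drop start).take (i - start)).count "O" := by
          simp [List.count_append, h2]
        rw [hcnt]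

-- ===== VERDICT =====
theorem SlideRocksNColumn_spec : Claim_equal_SlideRocksNColumn := by
  intro column _
  unfold Spec_SlideRocksNColumn SlideRocksNColumn SlideRocksNColumn_alt
  have hA := loopA_eq_gRocks column 0 [] [] [] (-1)
  have hB := loopB_eq_gRocks column column 0 0 [] (by simp) (le_refl _)
  simp only [List.nil_append] at hA hB
  rw [show ((0 : Nat) : Int) = (0 : Int) from rfl] at hB
  simpa using hA.trans (by simpa using hB.symm)
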